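-- pv_equiv track=rewrite | github.com/sampoll/ridxutils | scripts/order.py | offset_for_subscripts_cmajor
-- ===== SOURCE A (Python) =====
-- def offset_for_subscripts_cmajor(D, s):
--   m = len(D)
--   off = 0
--   for j in range(m):
--     p = 1
--     for i in range(0,j,1):
--       p = p * D[i]
--     off = off + p*s[j]
--   return off
-- ===== SOURCE B (Python) =====
-- def offset_for_subscripts_cmajor(D, s):
--   off = 0
--   p = 1
--   for d, x in zip(D, s):
--     off += p * x
--     p *= d
--   return off
-- ===== Notes on version B (the rewrite author's own statement) =====
-- stated objective: faster
-- what changed: Replaced the nested loop that recomputes the prefix product of D from scratch for every subscript with a single pass over zip(D, s) that maintains the running prefix product incrementally.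
import Mathlib
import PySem

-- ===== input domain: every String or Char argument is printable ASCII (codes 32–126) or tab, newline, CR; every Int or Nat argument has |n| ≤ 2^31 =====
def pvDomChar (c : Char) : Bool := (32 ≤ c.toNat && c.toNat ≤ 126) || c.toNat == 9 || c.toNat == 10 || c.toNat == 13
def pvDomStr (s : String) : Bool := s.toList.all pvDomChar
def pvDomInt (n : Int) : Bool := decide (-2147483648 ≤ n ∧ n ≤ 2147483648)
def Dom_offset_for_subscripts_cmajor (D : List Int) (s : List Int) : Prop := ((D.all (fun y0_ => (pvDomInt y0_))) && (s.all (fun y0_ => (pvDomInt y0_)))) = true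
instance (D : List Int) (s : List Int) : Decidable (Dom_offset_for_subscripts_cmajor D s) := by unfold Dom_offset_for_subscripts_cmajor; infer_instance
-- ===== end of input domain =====

-- B replaces A's O(m^2) nested recomputation of prefix products with one O(m) pass
-- over zip(D, s) maintaining the running prefix product (objective: faster).

-- ===== PORT A =====
-- pyGetD _ _ 0 is exact here: under Pre_ every index j (and i < j) is in range.
def offset_for_subscripts_cmajor (D : List Int) (s : List Int) : Int :=
  (PySem.List.pyRange 0 (D.length : Int) 1).foldl
    (fun off j =>
      let p := (PySem.List.pyRange 0 j 1).foldl
        (fun p i => p * PySem.List.pyGetD D i 0) 1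
      off + p * PySem.List.pyGetD s j 0) 0

-- ===== PORT B =====
def offset_for_subscripts_cmajor_alt (D : List Int) (s : List Int) : Int :=
  ((D.zip s).foldl (fun st dx => (st.1 + st.2 * dx.2, st.2 * dx.1)) ((0 : Int), (1 : Int))).1

-- ===== PRECONDITION & SPEC =====
-- Pre_ excludes exactly the inputs where A raises IndexError on s[j] (s shorter than D).
def Pre_offset_for_subscripts_cmajor (D : List Int) (s : List Int) : Prop :=
  D.length ≤ s.length
instance (D : List Int) (s : List Int) : Decidable (Pre_offset_for_subscripts_cmajor D s) := by
  unfold Pre_offset_for_subscripts_cmajor; infer_instance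
def pvWitness_offset_for_subscripts_cmajor : List Int × List Int := ([4, 5, 6], [1, 2, 3])

def Spec_offset_for_subscripts_cmajor (D : List Int) (s : List Int) (out : Int) : Prop := out = offset_for_subscripts_cmajor_alt D s
instance (D : List Int) (s : List Int) (out : Int) : Decidable (Spec_offset_for_subscripts_cmajor D s out) := by unfold Spec_offset_for_subscripts_cmajor; infer_instance

-- ===== CLAIM (what is proved, stated in full; the proofs are below) =====
def Claim_equal_offset_for_subscripts_cmajor : Prop := ∀ (D : List Int) (s : List Int), Dom_offset_for_subscripts_cmajor D s → Pre_offset_for_subscripts_cmajor D s → Spec_offset_for_subscripts_cmajor D s (offset_for_subscripts_cmajor D s)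
-- ===== LEMMAS AND PROOFS =====

-- Horner form of the C-major offset: off = s0 + D0*(s1 + D1*(s2 + ...)).
def pvHorner : List Int → List Int → Int
  | [], _ => 0
  | _ :: _, [] => 0
  | d :: D, x :: s => x + d * pvHorner D s

theorem pvAlt_eq_horner : ∀ (D s : List Int) (off p : Int),
    ((D.zip s).foldl (fun st dx => (st.1 + st.2 * dx.2, st.2 * dx.1)) (off, p)).1
      = off + p * pvHorner D s := by
  intro D
  induction D with
  | nil => intro s off p; simp [pvHorner]
  | cons d D ih =>
    intro s off p
    cases s with
    | nil => simp [pvHorner]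
    | cons x s =>
      simp only [List.zip, List.zipWith_cons_cons, List.foldl_cons, pvHorner]
      rw [show List.zipWith Prod.mk D s = D.zip s from rfl, ih]; ring

theorem pvFoldl_mul {α : Type} (g : α → Int) : ∀ (l : List α) (a : Int),
    l.foldl (fun p x => p * g x) a = a * (l.map g).prod := by
  intro l
  induction l with
  | nil => simp
  | cons y l ih => intro a; simp [ih]; ring

theorem pvRangeMap_take : ∀ (k : Nat) (D : List Int), k ≤ D.length →
    (List.range k).map (fun i => D.getD i 0) = D.take k := by
  intro k
  induction k with
  | zero => intro D _; simp
  | succ n ih =>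
    intro D hk
    cases D with
    | nil => simp at hk
    | cons d D =>
      rw [List.range_succ_eq_map, List.map_cons, List.map_map]
      simp only [Function.comp_def, List.getD_cons_zero, List.getD_cons_succ,
        List.take_succ_cons]
      rw [ih D (by simpa using hk)]

theorem pvA_sum (D s : List Int) :
    offset_for_subscripts_cmajor D s
      = ((List.range D.length).map
          (fun j => (D.take j).prod * s.getD j 0)).sum := by
  unfold offset_for_subscripts_cmajor
  rw [PySem.List.pyRange_one]
  simp only [Int.sub_zero, Int.toNat_natCast]
  rw [List.foldl_map]
  rw [PySem.List.foldl_add]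
  simp only [Int.zero_add, PySem.List.pyGetD_natCast, Int.zero_add]
  refine congrArg List.sum (List.map_congr_left ?_)
  intro k hk
  rw [PySem.List.pyRange_one]
  simp only [Int.sub_zero, Int.toNat_natCast]
  rw [List.foldl_map, pvFoldl_mul]
  simp only [PySem.List.pyGetD_natCast, Int.zero_add, one_mul]
  rw [pvRangeMap_take k D (by have := List.mem_range.mp hk; omega)]

theorem pvSum_eq_horner : ∀ (D s : List Int), D.length ≤ s.length →
    ((List.range D.length).map (fun j => (D.take j).prod * s.getD j 0)).sum
      = pvHorner D s := by
  intro D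
  induction D with
  | nil => intro s _; simp [pvHorner]
  | cons d D ih =>
    intro s hs
    cases s with
    | nil => simp at hs
    | cons x s =>
      rw [List.length_cons, List.range_succ_eq_map]
      simp only [List.map_cons, List.map_map, Function.comp_def, List.take_zero,
        List.prod_nil, one_mul, List.getD_cons_zero, List.take_succ_cons,
        List.prod_cons, List.getD_cons_succ, List.sum_cons, pvHorner]
      have : ∀ j, d * (D.take j).prod * s.getD j 0
          = d * ((D.take j).prod * s.getD j 0) := by intro j; ring
      simp only [this]
      rw [List.sum_map_mul_left, ih s (by simpa using hs)]

-- ===== VERDICT (by name: the statement is the Claim_ definition above) =====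
theorem offset_for_subscripts_cmajor_spec : Claim_equal_offset_for_subscripts_cmajor := by
  intro D s _ hpre
  unfold Spec_offset_for_subscripts_cmajor offset_for_subscripts_cmajor_alt
  rw [pvAlt_eq_horner, pvA_sum, pvSum_eq_horner D s hpre]
  ring
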